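-- pv_equiv track=rewrite | github.com/haowei2000/RBLU | src/rblu/test.py | split_and_process
-- ===== SOURCE A (Python) =====
-- def process_batch_1(data):
--     """处理第一批数据的函数"""
--     return [f"{x}_A" for x in data]  # 示例处理：在元素后面加 `_A`
--
-- def process_batch_2(data):
--     """处理第二批数据的函数"""
--     return [f"{x}_B" for x in data]  # 示例处理：在元素后面加 `_B`
--
-- def split_and_process(lst):
--     # 1️⃣ 拆分列表并保存原索引
--     batch_1 = [x for i, x in enumerate(lst) if i % 2 == 0]  # 偶数索引的元素
--     batch_2 = [x for i, x in enumerate(lst) if i % 2 != 0]  # 奇数索引的元素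
--
--     # 2️⃣ 送往不同的函数处理
--     result_1 = process_batch_1(batch_1)
--     result_2 = process_batch_2(batch_2)
--
--     # 3️⃣ 结果合并，恢复原顺序
--     result = []
--     iter_1, iter_2 = iter(result_1), iter(result_2)
--     for i in range(len(lst)):
--         if i % 2 == 0:
--             result.append(next(iter_1))  # 取 batch_1 结果
--         else:
--             result.append(next(iter_2))  # 取 batch_2 结果
--
--     return result
-- ===== SOURCE B (Python) =====
-- def split_and_process(lst):
--     return [f"{x}_A" if i % 2 == 0 else f"{x}_B" for i, x in enumerate(lst)]
-- ===== Notes on version B (the rewrite author's own statement) =====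
-- stated objective: simpler
-- what changed: Replaced the split/process/merge three-pass pipeline (partition by parity, map two suffix functions, interleave back via iterators) with a single enumerate pass that appends the suffix chosen by the index parity in place.
import Mathlib
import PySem

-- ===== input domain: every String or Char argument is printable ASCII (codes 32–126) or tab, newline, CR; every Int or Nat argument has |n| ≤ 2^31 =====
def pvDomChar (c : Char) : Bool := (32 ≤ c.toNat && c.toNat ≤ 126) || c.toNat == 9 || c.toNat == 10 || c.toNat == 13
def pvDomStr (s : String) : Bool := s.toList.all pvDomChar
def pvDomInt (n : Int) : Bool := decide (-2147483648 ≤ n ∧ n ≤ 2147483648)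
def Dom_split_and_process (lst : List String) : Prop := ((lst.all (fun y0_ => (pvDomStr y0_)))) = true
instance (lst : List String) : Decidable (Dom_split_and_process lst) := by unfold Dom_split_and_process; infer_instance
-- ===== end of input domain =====

-- B replaces A's split/process/merge pipeline by one enumerate pass choosing the suffix by index parity (objective: simpler).

-- ===== PORT A =====
def process_batch_1 (data : List String) : List String :=
  data.map (fun x => x ++ "_A")

def process_batch_2 (data : List String) : List String :=
  data.map (fun x => x ++ "_B")

-- The merge loop of A: for i in range(len lst), even i takes next(iter_1), odd i next(iter_2).
-- Ported with fuel = remaining iterations; the two iterators alternate, so they are swapped each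
-- step (the head list is the one the current step draws from). next() on an exhausted iterator
-- would raise StopIteration; that branch is unreachable for the lists A builds, where it returns [].
def pvMergeLoop : Nat → List String → List String → List String
  | 0, _, _ => []
  | n + 1, r1, r2 =>
    match r1 with
    | [] => []
    | a :: as => a :: pvMergeLoop n r2 as

def split_and_process (lst : List String) : List String :=
  let batch_1 := ((PySem.List.enumerate lst).filter (fun p => p.1 % 2 == 0)).map Prod.snd
  let batch_2 := ((PySem.List.enumerate lst).filter (fun p => !(p.1 % 2 == 0))).map Prod.snd
  let result_1 := process_batch_1 batch_1
  let result_2 := process_batch_2 batch_2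
  pvMergeLoop lst.length result_1 result_2

-- ===== PORT B =====
def split_and_process_alt (lst : List String) : List String :=
  (PySem.List.enumerate lst).map (fun p => if p.1 % 2 == 0 then p.2 ++ "_A" else p.2 ++ "_B")

-- ===== PRECONDITION & SPEC =====
def Spec_split_and_process (lst : List String) (out : List String) : Prop := out = split_and_process_alt lst
instance (lst : List String) (out : List String) : Decidable (Spec_split_and_process lst out) := by unfold Spec_split_and_process; infer_instance

-- ===== CLAIM (what is proved, stated in full; the proofs are below) =====
def Claim_equal_split_and_process : Prop := ∀ (lst : List String), Dom_split_and_process lst → Spec_split_and_process lst (split_and_process lst)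

-- ===== LEMMAS AND PROOFS =====

-- elements at even / odd positions
def pvEvens : List String → List String
  | [] => []
  | [x] => [x]
  | x :: _ :: rest => x :: pvEvens rest

def pvOdds : List String → List String
  | [] => []
  | [_] => []
  | _ :: y :: rest => y :: pvOdds rest

lemma filter_even_enumerate (lst : List String) (s : Int) (hs : s % 2 = 0) :
    ((PySem.List.enumerate lst s).filter (fun p => p.1 % 2 == 0)).map Prod.snd = pvEvens lst ∧
    ((PySem.List.enumerate lst s).filter (fun p => !(p.1 % 2 == 0))).map Prod.snd = pvOdds lst := by
  induction lst using pvEvens.induct generalizing s with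
  | case1 => simp [PySem.List.enumerate_nil, pvEvens, pvOdds]
  | case2 x =>
    have h0 : (s % 2 == 0) = true := by simpa using hs
    simp [PySem.List.enumerate_cons, PySem.List.enumerate_nil, pvEvens, pvOdds, h0]
  | case3 x y rest ih =>
    have h0 : (s % 2 == 0) = true := by simpa using hs
    have h1 : ((s + 1) % 2 == 0) = false := by
      simp only [beq_eq_false_iff_ne, ne_eq]
      omega
    have hs2 : (s + 1 + 1) % 2 = 0 := by omega
    obtain ⟨ihE, ihO⟩ := ih (s + 1 + 1) hs2
    simp [PySem.List.enumerate_cons, pvEvens, pvOdds, h0, h1, ihE, ihO]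

lemma merge_evens_odds (lst : List String) :
    pvMergeLoop lst.length ((pvEvens lst).map (fun x => x ++ "_A"))
      ((pvOdds lst).map (fun x => x ++ "_B")) =
    split_and_process_alt lst := by
  suffices h : ∀ (s : Int), s % 2 = 0 →
      pvMergeLoop lst.length ((pvEvens lst).map (fun x => x ++ "_A"))
        ((pvOdds lst).map (fun x => x ++ "_B")) =
      (PySem.List.enumerate lst s).map
        (fun p => if p.1 % 2 == 0 then p.2 ++ "_A" else p.2 ++ "_B") by
    exact h 0 rfl
  induction lst using pvEvens.induct with
  | case1 => intro s _; simp [PySem.List.enumerate_nil, pvEvens, pvOdds, pvMergeLoop]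
  | case2 x =>
    intro s hs
    have h0 : (s % 2 == 0) = true := by simpa using hs
    simp [PySem.List.enumerate_cons, PySem.List.enumerate_nil, pvEvens, pvOdds, pvMergeLoop]
    omega
  | case3 x y rest ih =>
    intro s hs
    have := ih (s + 1 + 1) (by omega)
    simp [PySem.List.enumerate_cons, pvEvens, pvOdds, pvMergeLoop, this, List.length_cons]
    omega

-- ===== VERDICT (by name: the statement is the Claim_ definition above) =====
theorem split_and_process_spec : Claim_equal_split_and_process := by
  intro lst _
  unfold Spec_split_and_process split_and_process process_batch_1 process_batch_2
  obtain ⟨hE, hO⟩ := filter_even_enumerate lst 0 rfl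
  simp only [hE, hO]
  exact merge_evens_odds lst
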